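-- pv_equiv track=rewrite | github.com/limits220284/CP | newcoder/round/round1/c.py | solve
-- ===== SOURCE A (Python) =====
-- def solve(s, t) -> int:
--     n = len(s)
--     s1 = [i for i in range(n) if s[i] == "1"]
--     t1 = [i for i in range(n) if t[i] == "1"]
--     ans = 0
--     for si, ti in zip(s1, t1):
--         ans += abs(si - ti)
--     return ans
-- ===== SOURCE B (Python) =====
-- def solve(s, t) -> int:
--     ans = 0
--     sq = []
--     tq = []
--     for i in range(len(s)):
--         if s[i] == "1":
--             sq.append(i)
--         if t[i] == "1":
--             tq.append(i)
--         while sq and tq: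
--             ans += abs(sq.pop(0) - tq.pop(0))
--     return ans
-- ===== Notes on version B (the rewrite author's own statement) =====
-- stated objective: alternative
-- what changed: Replaces the two full collect-positions passes plus a zip pass with a single streaming pass that keeps two queues of yet-unmatched '1' positions and pairs them greedily as soon as both queues are nonempty.
import Mathlib
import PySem

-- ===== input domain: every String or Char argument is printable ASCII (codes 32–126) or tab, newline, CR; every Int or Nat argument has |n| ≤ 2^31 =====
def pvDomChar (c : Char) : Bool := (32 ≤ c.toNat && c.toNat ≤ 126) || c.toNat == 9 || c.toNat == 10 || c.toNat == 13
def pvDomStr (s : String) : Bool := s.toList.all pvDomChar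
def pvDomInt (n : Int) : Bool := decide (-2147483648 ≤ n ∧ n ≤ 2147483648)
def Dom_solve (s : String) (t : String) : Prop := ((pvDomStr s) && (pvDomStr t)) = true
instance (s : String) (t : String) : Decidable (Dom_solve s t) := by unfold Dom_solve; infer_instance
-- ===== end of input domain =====

-- B replaces A's two collect-all-positions passes plus a zip pass by one streaming pass
-- that pairs '1' positions greedily from two queues (objective: alternative, same cost).

-- abs distance between two matched indices (both Pythons compute abs(si - ti))
def adist (x y : Nat) : Int := |((x : Int)) - (y : Int)|

-- ===== PORT A =====
def solve (s : String) (t : String) : Int :=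
  let n := s.toList.length
  let s1 := (List.range n).filter (fun i => s.toList.getD i '?' == '1')
  let t1 := (List.range n).filter (fun i => t.toList.getD i '?' == '1')
  (s1.zip t1).foldl (fun a p => a + adist p.1 p.2) 0

-- ===== PORT B =====
-- the `while sq and tq:` loop of Source B
def drain : List Nat → List Nat → Int → List Nat × List Nat × Int
  | x :: xs, y :: ys, a => drain xs ys (a + adist x y)
  | xs, ys, a => (xs, ys, a)

-- one iteration of Source B's for-loop
def stepB (s t : String) (st : List Nat × List Nat × Int) (i : Nat) : List Nat × List Nat × Int :=
  let sq := if s.toList.getD i '?' == '1' then st.1 ++ [i] else st.1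
  let tq := if t.toList.getD i '?' == '1' then st.2.1 ++ [i] else st.2.1
  drain sq tq st.2.2

def solve_alt (s : String) (t : String) : Int :=
  ((List.range s.toList.length).foldl (stepB s t) ([], [], 0)).2.2

-- ===== PRECONDITION & SPEC =====
-- Pre_ excludes exactly the inputs where Python A raises IndexError (t shorter than s);
-- Source B raises there too.
def Pre_solve (s : String) (t : String) : Prop := s.toList.length ≤ t.toList.length
instance (s : String) (t : String) : Decidable (Pre_solve s t) := by unfold Pre_solve; infer_instance
def pvWitness_solve : String × String := ("1010", "0110")

def Spec_solve (s : String) (t : String) (out : Int) : Prop := out = solve_alt s t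
instance (s : String) (t : String) (out : Int) : Decidable (Spec_solve s t out) := by unfold Spec_solve; infer_instance

-- ===== CLAIM (what is proved, stated in full; the proofs are below) =====
def Claim_equal_solve : Prop := ∀ (s : String) (t : String), Dom_solve s t → Pre_solve s t → Spec_solve s t (solve s t)

-- ===== LEMMAS AND PROOFS =====

-- sum of distances over pairwise-zipped position lists (A's result, in recursive form)
def zsum : List Nat → List Nat → Int
  | x :: xs, y :: ys => adist x y + zsum xs ys
  | _, _ => 0

theorem zsum_nil_right (A : List Nat) : zsum A [] = 0 := by
  cases A <;> simp [zsum]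

theorem foldl_zip_zsum (A B : List Nat) (a : Int) :
    (A.zip B).foldl (fun a p => a + adist p.1 p.2) a = a + zsum A B := by
  induction A generalizing B a with
  | nil => simp [zsum]
  | cons x xs ih =>
    cases B with
    | nil => simp [zsum]
    | cons y ys => simp [zsum, ih, add_assoc]

theorem drain_nil_right (xs : List Nat) (a : Int) : drain xs [] a = (xs, [], a) := by
  cases xs <;> simp [drain]

theorem drain_nil_left (ys : List Nat) (a : Int) : drain [] ys a = ([], ys, a) := by
  cases ys <;> simp [drain]

-- main invariant: folding Source B's loop body over L, starting from a state whose s-queue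
-- (resp. t-queue) holds leftover positions, yields the zip-sum of all collected positions
theorem stepB_foldl_inv (s t : String) (L : List Nat) :
    (∀ (xs : List Nat) (a : Int),
      (L.foldl (stepB s t) (xs, [], a)).2.2
        = a + zsum (xs ++ L.filter (fun i => s.toList.getD i '?' == '1'))
                   (L.filter (fun i => t.toList.getD i '?' == '1'))) ∧
    (∀ (ys : List Nat) (a : Int),
      (L.foldl (stepB s t) ([], ys, a)).2.2
        = a + zsum (L.filter (fun i => s.toList.getD i '?' == '1'))
                   (ys ++ L.filter (fun i => t.toList.getD i '?' == '1'))) := by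
  induction L with
  | nil => constructor <;> intro q a <;> simp [zsum, zsum_nil_right]
  | cons i L ih =>
    obtain ⟨ihL, ihR⟩ := ih
    constructor
    · intro xs a
      simp only [List.foldl_cons, stepB, List.filter_cons]
      by_cases hs : (s.toList.getD i '?' == '1') = true <;>
      by_cases ht : (t.toList.getD i '?' == '1') = true <;>
        simp only [hs, ht, if_true, if_false, if_pos, if_neg, Bool.false_eq_true,
          not_false_iff, List.append_nil]
      · -- both '1'
        cases xs with
        | nil => simp [drain, ihL, zsum, add_assoc]
        | cons x xs' =>
          have : drain (x :: (xs' ++ [i])) [i] a = (xs' ++ [i], [], a + adist x i) := by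
            simp [drain, drain_nil_right]
          simp [this, ihL, zsum, add_assoc]
      · -- s '1', t '0'
        simp [drain_nil_right, ihL, zsum, List.append_assoc]
      · -- s '0', t '1'
        cases xs with
        | nil => simp [drain, ihR, zsum]
        | cons x xs' =>
          have : drain (x :: xs') [i] a = (xs', [], a + adist x i) := by
            simp [drain, drain_nil_right]
          simp [this, ihL, zsum, add_assoc]
      · -- neither
        simp [drain_nil_right, ihL, zsum]
    · intro ys a
      simp only [List.foldl_cons, stepB, List.filter_cons]
      by_cases hs : (s.toList.getD i '?' == '1') = true <;>
      by_cases ht : (t.toList.getD i '?' == '1') = true <;>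
        simp only [hs, ht, if_true, if_false, if_pos, if_neg, Bool.false_eq_true,
          not_false_iff, List.append_nil]
      · -- both '1'
        cases ys with
        | nil => simp [drain, ihL, zsum, add_assoc]
        | cons y ys' =>
          have : drain [i] (y :: (ys' ++ [i])) a = ([], ys' ++ [i], a + adist i y) := by
            simp [drain]
          simp [this, ihR, zsum, add_assoc]
      · -- s '1', t '0'
        cases ys with
        | nil => simp [drain_nil_right, ihL, zsum]
        | cons y ys' =>
          have : drain [i] (y :: ys') a = ([], ys', a + adist i y) := by
            simp [drain]
          simp [this, ihR, zsum, add_assoc]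
      · -- s '0', t '1'
        simp [drain_nil_left, ihR, List.append_assoc]
      · -- neither
        simp [drain_nil_left, ihR]

-- ===== VERDICT (by name: the statement is the Claim_ definition above) =====
theorem solve_spec : Claim_equal_solve := by
  intro s t _ _
  show solve s t = solve_alt s t
  unfold solve solve_alt
  rw [foldl_zip_zsum]
  have h := (stepB_foldl_inv s t (List.range s.toList.length)).1 [] 0
  simp only [List.nil_append] at h
  simpa using h.symm
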